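-- pv_equiv track=rewrite | github.com/carawarner/grasp | python/scripts/vec.py | multiply_vecs
-- ===== SOURCE A (Python) =====
-- def multiply_vecs(vectors):
--     """Multiply 2 or more vectors. Return a vector."""
--     if len(vectors) <= 1:
--         return
--
--     if len(vectors) == 2:
--         vec_a = vectors[0]
--         vec_b = vectors[1]
--         return [vec_a[i] * vec_b[i] for i in range(len(vec_a))]
--
--     #Multiply first element by the product of remaining elements
--     return multiply_vecs([vectors[0], multiply_vecs(vectors[1:])])
-- ===== SOURCE B (Python) =====
-- def multiply_vecs(vectors):
--     """Multiply 2 or more vectors. Return a vector."""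
--     if len(vectors) <= 1:
--         return None
--     acc = vectors[-1]
--     for vec in reversed(vectors[:-1]):
--         acc = [vec[i] * acc[i] for i in range(len(vec))]
--     return acc
-- ===== Notes on version B (the rewrite author's own statement) =====
-- stated objective: simpler
-- what changed: Replaces A's recursion (which rebuilds a fresh two-element list of vectors at every level) with a single right-to-left fold that threads an accumulator over reversed(vectors[:-1]), reproducing A's right-associative nesting and per-step length semantics without any recursion or intermediate list-of-vectors allocations.
import Mathlib
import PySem

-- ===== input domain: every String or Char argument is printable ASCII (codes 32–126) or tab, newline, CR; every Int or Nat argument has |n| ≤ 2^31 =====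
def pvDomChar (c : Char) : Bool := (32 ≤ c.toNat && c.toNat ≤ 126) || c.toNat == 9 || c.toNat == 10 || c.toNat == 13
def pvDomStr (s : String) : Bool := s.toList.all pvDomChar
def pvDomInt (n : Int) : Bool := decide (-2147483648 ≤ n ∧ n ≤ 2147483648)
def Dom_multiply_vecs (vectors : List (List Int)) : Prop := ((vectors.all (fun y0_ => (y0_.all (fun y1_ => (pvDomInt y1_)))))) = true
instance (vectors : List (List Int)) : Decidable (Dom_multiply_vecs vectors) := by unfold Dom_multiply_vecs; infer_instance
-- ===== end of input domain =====

-- B replaces A's recursion by a single right-to-left fold over reversed(vectors[:-1]);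
-- return values proved equal on Pre_ (where A raises no IndexError); neither version mutates its argument.

-- ===== PORT A =====
-- the comprehension [vec_a[i] * vec_b[i] for i in range(len(vec_a))]; none = IndexError
def pvPairA (va vb : List Int) : Option (List Int) :=
  (PySem.List.pyRange 0 va.length 1).mapM
    (fun i => (PySem.List.pyGet? va i).bind (fun x => (PySem.List.pyGet? vb i).map (fun y => x * y)))

def multiply_vecs (vectors : List (List Int)) : Option (List Int) :=
  if vectors.length ≤ 1 then none
  else if vectors.length = 2 then
    match vectors with
    | va :: vb :: _ => pvPairA va vb
    | _ => none                    -- unreachable: length = 2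
  else
    -- multiply_vecs([vectors[0], multiply_vecs(vectors[1:])]); a none (IndexError) propagates
    match multiply_vecs (vectors.drop 1) with
    | none => none
    | some r => multiply_vecs [vectors.headI, r]
termination_by vectors.length
decreasing_by
  · simp only [List.length_drop]; omega
  · simp only [List.length_cons, List.length_nil]; omega

-- ===== PORT B =====
-- the comprehension [vec[i] * acc[i] for i in range(len(vec))]; none = IndexError
def pvStepB (vec acc : List Int) : Option (List Int) :=
  (PySem.List.pyRange 0 vec.length 1).mapM
    (fun i => (PySem.List.pyGet? vec i).bind (fun x => (PySem.List.pyGet? acc i).map (fun y => x * y)))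

def multiply_vecs_alt (vectors : List (List Int)) : Option (List Int) :=
  if vectors.length ≤ 1 then none
  else
    match PySem.List.pyGet? vectors (-1) with     -- acc = vectors[-1]
    | none => none                                -- unreachable: vectors nonempty
    | some last =>
      -- for vec in reversed(vectors[:-1]): acc = [vec[i] * acc[i] for i in range(len(vec))]
      ((PySem.List.slice vectors none (some (-1))).reverse).foldl
        (fun acc vec => acc.bind (fun a => pvStepB vec a)) (some last)

-- ===== PRECONDITION & SPEC =====
-- Pre_ excludes exactly the inputs where A raises IndexError: some vector is longer
-- than its right neighbour (the comprehension then indexes past the end of the product so far).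
def Pre_multiply_vecs (vectors : List (List Int)) : Prop :=
  (vectors.zip vectors.tail).all (fun p => p.1.length ≤ p.2.length) = true
instance (vectors : List (List Int)) : Decidable (Pre_multiply_vecs vectors) := by
  unfold Pre_multiply_vecs; infer_instance

def pvWitness_multiply_vecs : List (List Int) := [[1, 2], [3, 4], [5, 6]]

def Spec_multiply_vecs (vectors : List (List Int)) (out : Option (List Int)) : Prop := out = multiply_vecs_alt vectors
instance (vectors : List (List Int)) (out : Option (List Int)) : Decidable (Spec_multiply_vecs vectors out) := by unfold Spec_multiply_vecs; infer_instance

-- ===== CLAIM (what is proved, stated in full; the proofs are below) =====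
def Claim_equal_multiply_vecs : Prop := ∀ (vectors : List (List Int)), Dom_multiply_vecs vectors → Pre_multiply_vecs vectors → Spec_multiply_vecs vectors (multiply_vecs vectors)

-- ===== LEMMAS AND PROOFS =====

-- the two comprehensions are the same function
theorem pvPairA_eq_stepB : pvPairA = pvStepB := rfl

-- B's else-branch as a standalone function (proof helper)
def pvCore (vectors : List (List Int)) : Option (List Int) :=
  match PySem.List.pyGet? vectors (-1) with
  | none => none
  | some last =>
      ((PySem.List.slice vectors none (some (-1))).reverse).foldl
        (fun acc vec => acc.bind (fun a => pvStepB vec a)) (some last)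

theorem alt_eq_core (vectors : List (List Int)) (h : ¬ vectors.length ≤ 1) :
    multiply_vecs_alt vectors = pvCore vectors := by
  unfold multiply_vecs_alt pvCore
  rw [if_neg h]

theorem core_two (a b : List Int) : pvCore [a, b] = pvStepB a b := by
  simp [pvCore, PySem.List.pyGet?_neg_one, PySem.List.slice_to_neg_one]

theorem core_cons (v r : List Int) (rs : List (List Int)) :
    pvCore (v :: r :: rs) = (pvCore (r :: rs)).bind (fun a => pvStepB v a) := by
  have hd : (v :: r :: rs).dropLast.reverse = (r :: rs).dropLast.reverse ++ [v] := by
    rw [show (v :: r :: rs).dropLast = v :: (r :: rs).dropLast from rfl, List.reverse_cons]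
  unfold pvCore
  rw [PySem.List.pyGet?_neg_one, PySem.List.pyGet?_neg_one, List.getLast?_cons_cons,
      PySem.List.slice_to_neg_one, PySem.List.slice_to_neg_one, hd]
  cases (r :: rs).getLast? with
  | none => rfl
  | some last =>
    show List.foldl (fun acc vec => acc.bind fun a => pvStepB vec a) (some last)
          ((r :: rs).dropLast.reverse ++ [v]) =
        (List.foldl (fun acc vec => acc.bind fun a => pvStepB vec a) (some last)
          (r :: rs).dropLast.reverse).bind (fun a => pvStepB v a)
    rw [List.foldl_append]
    rfl

theorem mv_two (a b : List Int) : multiply_vecs [a, b] = pvPairA a b := by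
  unfold multiply_vecs
  norm_num

theorem mv_eq_core (vectors : List (List Int)) (h : 2 ≤ vectors.length) :
    multiply_vecs vectors = pvCore vectors := by
  induction vectors with
  | nil => simp at h
  | cons v rest ih =>
    match rest, ih with
    | [], _ => simp at h
    | [b], _ =>
      rw [mv_two, core_two, pvPairA_eq_stepB]
    | r :: r' :: rs, ih =>
      have hlen : ¬ (v :: r :: r' :: rs).length ≤ 1 := by simp
      have hlen2 : ¬ (v :: r :: r' :: rs).length = 2 := by simp
      rw [core_cons]
      unfold multiply_vecs
      rw [if_neg hlen, if_neg hlen2]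
      have hrest : multiply_vecs ((v :: r :: r' :: rs).drop 1) = pvCore (r :: r' :: rs) := by
        simpa using ih (by simp)
      rw [hrest]
      cases hc : pvCore (r :: r' :: rs) with
      | none => rfl
      | some res =>
        simp only [Option.bind_some, List.headI]
        rw [mv_two, pvPairA_eq_stepB]


-- ===== VERDICT (by name: the statement is the Claim_ definition above) =====
theorem multiply_vecs_spec : Claim_equal_multiply_vecs := by
  intro vectors _dom _pre
  unfold Spec_multiply_vecs
  by_cases h : vectors.length ≤ 1
  · unfold multiply_vecs multiply_vecs_alt
    rw [if_pos h, if_pos h]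
  · rw [mv_eq_core vectors (by omega), alt_eq_core vectors h]
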